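-- pv_equiv track=rewrite | github.com/BuilderChat/PII-Redactor | src/pii_engine.py | _count_matching_phrases
-- ===== SOURCE A (Python) =====
-- def _count_matching_phrases(words: list[str], phrases: set[str], max_words: int = 4) -> int:
--     if not words:
--         return 0
--     seen: set[str] = set()
--     upper = min(max_words, len(words))
--     for width in range(upper, 0, -1):
--         for idx in range(0, len(words) - width + 1):
--             candidate = " ".join(words[idx : idx + width])
--             if candidate in phrases:
--                 seen.add(candidate)
--     return len(seen)
-- ===== SOURCE B (Python) =====
-- def _count_matching_phrases(words: list[str], phrases: set[str], max_words: int = 4) -> int: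
--     upper = min(max_words, len(words))
--     count = 0
--     for p in phrases:
--         if any(" ".join(words[i:i + w]) == p
--                for w in range(1, upper + 1)
--                for i in range(len(words) - w + 1)):
--             count += 1
--     return count
-- ===== Notes on version B (the rewrite author's own statement) =====
-- stated objective: alternative
-- what changed: B loops over each phrase and tests with an early-exiting any() whether some contiguous word-run of admissible width joins to it, instead of A's position-driven sweep that materializes the join of every window of every width and accumulates a 'seen' set whose size it returns.
import Mathlib
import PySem

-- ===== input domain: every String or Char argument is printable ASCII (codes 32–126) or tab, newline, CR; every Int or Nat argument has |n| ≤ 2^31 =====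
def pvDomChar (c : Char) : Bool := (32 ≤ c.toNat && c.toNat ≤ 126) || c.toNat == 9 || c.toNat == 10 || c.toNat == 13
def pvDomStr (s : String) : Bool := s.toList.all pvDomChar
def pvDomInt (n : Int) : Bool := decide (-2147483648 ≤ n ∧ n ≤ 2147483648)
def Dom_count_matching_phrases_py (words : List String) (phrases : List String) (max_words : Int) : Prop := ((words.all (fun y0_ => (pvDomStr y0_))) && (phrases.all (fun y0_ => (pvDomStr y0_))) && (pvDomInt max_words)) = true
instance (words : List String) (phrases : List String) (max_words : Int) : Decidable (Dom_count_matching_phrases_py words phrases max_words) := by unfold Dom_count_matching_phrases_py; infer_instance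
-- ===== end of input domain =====

-- B replaces A's position-driven sweep (accumulating a 'seen' set and returning its size) by a
-- per-phrase existence test over contiguous word-runs; alternative decomposition, same results.


-- ===== PORT A =====
def count_matching_phrases_py (words : List String) (phrases : List String) (max_words : Int) : Int :=
  if words = [] then 0
  else
    let upper := min max_words (words.length : Int)
    let seen : PySem.Set String :=
      (PySem.List.pyRange upper 0 (-1)).foldl (fun seen width =>
        (PySem.List.pyRange 0 ((words.length : Int) - width + 1) 1).foldl (fun seen idx =>
          let candidate := PySem.Str.join " " (PySem.List.slice words (some idx) (some (idx + width)))
          if phrases.contains candidate then PySem.Set.add seen candidate else seen) seen)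
        PySem.Set.empty
    (PySem.Set.len seen : Int)

-- ===== PORT B =====
def count_matching_phrases_py_alt (words : List String) (phrases : List String) (max_words : Int) : Int :=
  let upper := min max_words (words.length : Int)
  phrases.foldl (fun count p =>
    if (PySem.List.pyRange 1 (upper + 1) 1).any (fun w =>
         (PySem.List.pyRange 0 ((words.length : Int) - w + 1) 1).any (fun i =>
           PySem.Str.join " " (PySem.List.slice words (some i) (some (i + w))) == p))
    then count + 1 else count) 0

-- ===== PRECONDITION & SPEC =====
-- Pre_: 'phrases' models a Python set, so under the type convention its list holds DISTINCT elements;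
-- this excludes nothing a Python caller can pass (A's parameter is set[str]).
def Pre_count_matching_phrases_py (words : List String) (phrases : List String) (max_words : Int) : Prop := phrases.Nodup
instance (words : List String) (phrases : List String) (max_words : Int) : Decidable (Pre_count_matching_phrases_py words phrases max_words) := by unfold Pre_count_matching_phrases_py; infer_instance
def pvWitness_count_matching_phrases_py : List String × List String × Int := (["a", "b", "a"], ["a b", "b a", "c"], 4)

def Spec_count_matching_phrases_py (words : List String) (phrases : List String) (max_words : Int) (out : Int) : Prop := out = count_matching_phrases_py_alt words phrases max_words
instance (words : List String) (phrases : List String) (max_words : Int) (out : Int) : Decidable (Spec_count_matching_phrases_py words phrases max_words out) := by unfold Spec_count_matching_phrases_py; infer_instance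

-- ===== CLAIM (what is proved, stated in full; the proofs are below) =====
def Claim_equal_count_matching_phrases_py : Prop := ∀ (words : List String) (phrases : List String) (max_words : Int), Dom_count_matching_phrases_py words phrases max_words → Pre_count_matching_phrases_py words phrases max_words → Spec_count_matching_phrases_py words phrases max_words (count_matching_phrases_py words phrases max_words)

-- ===== LEMMAS AND PROOFS =====

-- the candidate run starting at i of width w, as both ports build it
def pvCand (words : List String) (w i : Int) : String :=
  PySem.Str.join " " (PySem.List.slice words (some i) (some (i + w)))

-- B's per-phrase test, as a Bool predicate
def pvHit (words : List String) (upper : Int) (p : String) : Bool :=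
  (PySem.List.pyRange 1 (upper + 1) 1).any (fun w =>
    (PySem.List.pyRange 0 ((words.length : Int) - w + 1) 1).any (fun i =>
      pvCand words w i == p))

lemma pvB_eq_countP (words phrases : List String) (max_words : Int) :
    count_matching_phrases_py_alt words phrases max_words
      = (phrases.countP (pvHit words (min max_words (words.length : Int))) : Int) := by
  have := PySem.List.foldl_if_add_one
    (pvHit words (min max_words (words.length : Int))) phrases 0
  simpa [count_matching_phrases_py_alt, pvHit, pvCand] using this

-- membership/nodup invariant of A's inner loop (over start indices, fixed width)
lemma pvInner_spec (words phrases : List String) (w : Int) (L : List Int) (s : List String) :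
    (∀ x, x ∈ L.foldl (fun s idx =>
        if phrases.contains (pvCand words w idx) then PySem.Set.add s (pvCand words w idx) else s) s
      ↔ x ∈ s ∨ (x ∈ phrases ∧ ∃ i ∈ L, pvCand words w i = x))
    ∧ (s.Nodup → (L.foldl (fun s idx =>
        if phrases.contains (pvCand words w idx) then PySem.Set.add s (pvCand words w idx) else s) s).Nodup) := by
  induction L generalizing s with
  | nil => simp
  | cons a t ih =>
    constructor
    · intro x
      rw [List.foldl_cons, (ih _).1 x]
      by_cases h : phrases.contains (pvCand words w a)
      · simp only [h, if_pos]
        rw [PySem.Set.mem_add]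
        constructor
        · rintro ((hs | he) | ⟨hp, i, hi, hc⟩)
          · exact Or.inl hs
          · exact Or.inr ⟨by simpa using (List.contains_iff_mem).1 (he ▸ h), a, by simp, he.symm⟩
          · exact Or.inr ⟨hp, i, by simp [hi], hc⟩
        · rintro (hs | ⟨hp, i, hi, hc⟩)
          · exact Or.inl (Or.inl hs)
          · rcases List.mem_cons.1 hi with rfl | hi
            · exact Or.inl (Or.inr hc.symm)
            · exact Or.inr ⟨hp, i, hi, hc⟩
      · simp only [h, if_neg, Bool.false_eq_true, not_false_iff]
        constructor
        · rintro (hs | ⟨hp, i, hi, hc⟩)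
          · exact Or.inl hs
          · exact Or.inr ⟨hp, i, by simp [hi], hc⟩
        · rintro (hs | ⟨hp, i, hi, hc⟩)
          · exact Or.inl hs
          · rcases List.mem_cons.1 hi with rfl | hi
            · exact absurd ((List.contains_iff_mem).2 (hc ▸ hp)) h
            · exact Or.inr ⟨hp, i, hi, hc⟩
    · intro hs
      rw [List.foldl_cons]
      refine (ih _).2 ?_
      by_cases h : pvCand words w a ∈ phrases
      · simpa [h] using PySem.Set.nodup_add s (pvCand words w a) hs
      · simpa [h] using hs

-- membership/nodup invariant of A's outer loop (over widths)
lemma pvOuter_spec (words phrases : List String) (W : List Int) (s : List String) :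
    (∀ x, x ∈ W.foldl (fun s width =>
        (PySem.List.pyRange 0 ((words.length : Int) - width + 1) 1).foldl (fun s idx =>
          if phrases.contains (pvCand words width idx) then PySem.Set.add s (pvCand words width idx) else s) s) s
      ↔ x ∈ s ∨ (x ∈ phrases ∧ ∃ w ∈ W, ∃ i ∈ PySem.List.pyRange 0 ((words.length : Int) - w + 1) 1, pvCand words w i = x))
    ∧ (s.Nodup → (W.foldl (fun s width =>
        (PySem.List.pyRange 0 ((words.length : Int) - width + 1) 1).foldl (fun s idx =>
          if phrases.contains (pvCand words width idx) then PySem.Set.add s (pvCand words width idx) else s) s) s).Nodup) := by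
  induction W generalizing s with
  | nil => simp
  | cons a t ih =>
    constructor
    · intro x
      rw [List.foldl_cons, (ih _).1 x,
        (pvInner_spec words phrases a (PySem.List.pyRange 0 ((words.length : Int) - a + 1) 1) s).1 x]
      constructor
      · rintro ((hs | ⟨hp, i, hi, hc⟩) | ⟨hp, w, hw, i, hi, hc⟩)
        · exact Or.inl hs
        · exact Or.inr ⟨hp, a, by simp, i, hi, hc⟩
        · exact Or.inr ⟨hp, w, by simp [hw], i, hi, hc⟩
      · rintro (hs | ⟨hp, w, hw, i, hi, hc⟩)
        · exact Or.inl (Or.inl hs)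
        · rcases List.mem_cons.1 hw with rfl | hw
          · exact Or.inl (Or.inr ⟨hp, i, hi, hc⟩)
          · exact Or.inr ⟨hp, w, hw, i, hi, hc⟩
    · intro hs
      rw [List.foldl_cons]
      exact (ih _).2
        ((pvInner_spec words phrases a (PySem.List.pyRange 0 ((words.length : Int) - a + 1) 1) s).2 hs)

-- B's Bool test unfolded to the existence of a matching run
lemma pvHit_iff (words : List String) (upper : Int) (p : String) :
    pvHit words upper p = true ↔
      ∃ w ∈ PySem.List.pyRange 1 (upper + 1) 1,
        ∃ i ∈ PySem.List.pyRange 0 ((words.length : Int) - w + 1) 1, pvCand words w i = p := by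
  simp [pvHit, List.any_eq_true]

-- A's countdown width range has the same members as B's increasing one
lemma pvWidths_mem (upper w : Int) :
    w ∈ PySem.List.pyRange upper 0 (-1) ↔ w ∈ PySem.List.pyRange 1 (upper + 1) 1 := by
  rw [PySem.List.mem_pyRange_neg_one, PySem.List.mem_pyRange_one]
  omega

-- ===== VERDICT (by name: the statement is the Claim_ definition above) =====
theorem count_matching_phrases_py_spec : Claim_equal_count_matching_phrases_py := by
  intro words phrases max_words _ hpre
  unfold Spec_count_matching_phrases_py
  rw [pvB_eq_countP]
  by_cases hw : words = []
  · subst hw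
    have hnil : PySem.List.pyRange 1 (min max_words (0 : Int) + 1) 1 = [] :=
      PySem.List.pyRange_one_eq_nil (by omega)
    have hfalse : ∀ p, pvHit ([] : List String) (min max_words (0 : Int)) p = false := by
      intro p; simp [pvHit, hnil]
    have hfil : List.filter (pvHit ([] : List String) (min max_words (0 : Int))) phrases = [] :=
      List.filter_eq_nil_iff.2 (fun p _ => by simp [hfalse p])
    simp [count_matching_phrases_py, List.countP_eq_length_filter, hfil]
  · simp only [count_matching_phrases_py, if_neg hw]
    set upper := min max_words ((words.length : Int)) with hupper
    have hchar := pvOuter_spec words phrases (PySem.List.pyRange upper 0 (-1)) PySem.Set.empty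
    set seen := (PySem.List.pyRange upper 0 (-1)).foldl (fun s width =>
        (PySem.List.pyRange 0 ((words.length : Int) - width + 1) 1).foldl (fun s idx =>
          if phrases.contains (pvCand words width idx) then PySem.Set.add s (pvCand words width idx) else s) s)
        PySem.Set.empty with hseen
    have hmem : ∀ x, x ∈ seen ↔ x ∈ phrases.filter (pvHit words upper) := by
      intro x
      rw [hseen, hchar.1 x, List.mem_filter, pvHit_iff]
      constructor
      · rintro (h | ⟨hp, w, hwm, hrest⟩)
        · simp at h
        · exact ⟨hp, w, (pvWidths_mem upper w).1 hwm, hrest⟩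
      · rintro ⟨hp, w, hwm, hrest⟩
        exact Or.inr ⟨hp, w, (pvWidths_mem upper w).2 hwm, hrest⟩
    have hnd : seen.Nodup := hchar.2 (by simp [PySem.Set.empty])
    have hperm : seen.Perm (phrases.filter (pvHit words upper)) :=
      (List.perm_ext_iff_of_nodup hnd (hpre.filter _)).2 hmem
    have : PySem.Set.len seen = (phrases.filter (pvHit words upper)).length := by
      simpa [PySem.Set.len] using hperm.length_eq
    rw [List.countP_eq_length_filter]
    exact_mod_cast this
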